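-- pv_equiv track=rewrite | github.com/thomasz5/leetcode-offline | scripts/new_problem.py | to_valid_module_name
-- ===== SOURCE A (Python) =====
-- def to_valid_module_name(name: str) -> str:
--     # Convert to a valid Python identifier for module/filename: lowercase words separated by underscores
--     normalized = name.strip().lower()
--     parts = []
--     word = []
--     for ch in normalized:
--         if ch.isalnum():
--             word.append(ch)
--         else:
--             if word:
--                 parts.append(''.join(word))
--                 word = []
--     if word:
--         parts.append(''.join(word))
--     module = '_'.join(p for p in parts if p)
--     if not module:
--         module = "problem"
--     return module
-- ===== SOURCE B (Python) =====
-- def to_valid_module_name(name: str) -> str: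
--     # run-extraction scan: find each maximal alphanumeric run and slice it out
--     s = name.strip().lower()
--     parts = []
--     i, n = 0, len(s)
--     while i < n:
--         if s[i].isalnum():
--             j = i
--             while j < n and s[j].isalnum():
--                 j += 1
--             parts.append(s[i:j])
--             i = j
--         else:
--             i += 1
--     return '_'.join(parts) if parts else "problem"
-- ===== Notes on version B (the rewrite author's own statement) =====
-- stated objective: simpler
-- what changed: B extracts maximal alphanumeric runs by scanning ahead and slicing (takeWhile/dropWhile structure) instead of A's char-by-char word-accumulator state machine with a trailing flush and a filter before the join.
import Mathlib
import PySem

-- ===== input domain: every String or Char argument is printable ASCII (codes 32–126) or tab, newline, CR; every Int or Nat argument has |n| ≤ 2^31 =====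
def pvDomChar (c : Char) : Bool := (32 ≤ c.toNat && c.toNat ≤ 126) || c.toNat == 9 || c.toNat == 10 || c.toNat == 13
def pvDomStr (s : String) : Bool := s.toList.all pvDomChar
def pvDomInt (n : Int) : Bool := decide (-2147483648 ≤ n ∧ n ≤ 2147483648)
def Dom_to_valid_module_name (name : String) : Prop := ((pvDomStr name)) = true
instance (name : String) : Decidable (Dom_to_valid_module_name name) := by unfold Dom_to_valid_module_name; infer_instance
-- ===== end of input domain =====

-- B replaces A's char-by-char word-accumulator state machine (with trailing flush and
-- filter-before-join) by a run-extraction scan slicing out maximal alphanumeric runs; simpler.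

-- ===== PORT A =====
-- A's loop body: state is (parts, word)
def pvStepA (st : List (List Char) × List Char) (ch : Char) : List (List Char) × List Char :=
  if PySem.Chars.isalnum ch then (st.1, st.2 ++ [ch])
  else if st.2.isEmpty then st else (st.1 ++ [st.2], [])

def to_valid_module_name (name : String) : String :=
  let normalized := PySem.Str.lower (PySem.Str.strip name)
  let res := normalized.toList.foldl pvStepA ([], [])
  let parts := if res.2.isEmpty then res.1 else res.1 ++ [res.2]
  let module := PySem.Chars.join ['_'] (parts.filter (fun p => !p.isEmpty))
  if module.isEmpty then "problem" else String.ofList module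

-- ===== PORT B =====
-- B's scan: slice out each maximal alphanumeric run (Source B's j-scan + slice = takeWhile/dropWhile)
def pvAltRuns (cs : List Char) : List (List Char) :=
  match cs with
  | [] => []
  | c :: rest =>
    if PySem.Chars.isalnum c then
      (c :: rest.takeWhile PySem.Chars.isalnum) :: pvAltRuns (rest.dropWhile PySem.Chars.isalnum)
    else pvAltRuns rest
termination_by cs.length
decreasing_by
  · simpa using Nat.lt_succ_of_le (List.length_dropWhile_le _ _)
  · simp

def to_valid_module_name_alt (name : String) : String :=
  let parts := pvAltRuns (PySem.Chars.lower (PySem.Chars.strip name.toList))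
  if parts.isEmpty then "problem" else String.ofList (PySem.Chars.join ['_'] parts)

-- ===== PRECONDITION & SPEC =====
def Spec_to_valid_module_name (name : String) (out : String) : Prop := out = to_valid_module_name_alt name
instance (name : String) (out : String) : Decidable (Spec_to_valid_module_name name out) := by unfold Spec_to_valid_module_name; infer_instance

-- ===== CLAIM (what is proved, stated in full; the proofs are below) =====
def Claim_equal_to_valid_module_name : Prop := ∀ (name : String), Dom_to_valid_module_name name → Spec_to_valid_module_name name (to_valid_module_name name)

-- ===== LEMMAS AND PROOFS =====

-- A's loop, parts accumulator dropped, with the trailing flush applied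
def pvRunsAux (word : List Char) (cs : List Char) : List (List Char) :=
  match cs with
  | [] => if word.isEmpty then [] else [word]
  | c :: rest =>
    if PySem.Chars.isalnum c then pvRunsAux (word ++ [c]) rest
    else (if word.isEmpty then [] else [word]) ++ pvRunsAux [] rest

theorem pvFoldA_eq (cs : List Char) : ∀ (parts : List (List Char)) (word : List Char),
    (let r := cs.foldl pvStepA (parts, word);
     if r.2.isEmpty then r.1 else r.1 ++ [r.2]) = parts ++ pvRunsAux word cs := by
  induction cs with
  | nil =>
    intro parts word
    by_cases h : word.isEmpty <;> simp [pvRunsAux, h]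
  | cons c rest ih =>
    intro parts word
    simp only [List.foldl_cons, pvStepA, pvRunsAux]
    by_cases hc : PySem.Chars.isalnum c
    · simpa [hc] using ih parts (word ++ [c])
    · by_cases hw : word.isEmpty
      · obtain rfl := List.isEmpty_iff.mp hw
        simpa [hc] using ih parts []
      · simpa [hc, hw] using ih (parts ++ [word]) []

theorem pvRunsAux_spec (cs : List Char) : ∀ (word : List Char),
    pvRunsAux word cs =
      if word.isEmpty then pvAltRuns cs
      else (word ++ cs.takeWhile PySem.Chars.isalnum) ::
             pvAltRuns (cs.dropWhile PySem.Chars.isalnum) := by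
  induction cs with
  | nil =>
    intro word
    by_cases h : word.isEmpty
    · obtain rfl := List.isEmpty_iff.mp h
      simp [pvRunsAux, pvAltRuns]
    · simp [pvRunsAux, h, pvAltRuns]
  | cons c rest ih =>
    intro word
    simp only [pvRunsAux]
    by_cases hc : PySem.Chars.isalnum c
    · rw [ih (word ++ [c])]
      by_cases hw : word.isEmpty
      · rw [List.isEmpty_iff.mp hw]
        simp [pvAltRuns, hc]
      · simp [hw, hc]
    · rw [ih []]
      by_cases hw : word.isEmpty
      · rw [List.isEmpty_iff.mp hw]
        simp [pvAltRuns, hc]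
      · simp [hw, hc, pvAltRuns]

theorem pvAltRuns_ne_nil (cs : List Char) : ∀ p ∈ pvAltRuns cs, p ≠ [] := by
  induction cs using pvAltRuns.induct with
  | case1 => simp [pvAltRuns]
  | case2 c rest hc ih =>
    intro p hp
    rw [pvAltRuns] at hp
    simp only [hc, if_pos] at hp
    rcases List.mem_cons.mp hp with h | h
    · simp [h]
    · exact ih p h
  | case3 c rest hc ih =>
    intro p hp
    rw [pvAltRuns] at hp
    simp only [hc] at hp
    exact ih p (by simpa using hp)

theorem pvJoin_ne_nil (parts : List (List Char)) (hne : parts ≠ [])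
    (hall : ∀ p ∈ parts, p ≠ []) : PySem.Chars.join ['_'] parts ≠ [] := by
  match parts with
  | [p] =>
    rw [PySem.Chars.join_singleton]
    exact hall p (by simp)
  | p :: q :: rest =>
    rw [PySem.Chars.join_cons_cons]
    have : p ≠ [] := hall p (by simp)
    simp [this]

-- ===== VERDICT (by name: the statement is the Claim_ definition above) =====
theorem to_valid_module_name_spec : Claim_equal_to_valid_module_name := by
  intro name _
  unfold Spec_to_valid_module_name
  simp only [to_valid_module_name, to_valid_module_name_alt]
  have hbridge : (PySem.Str.lower (PySem.Str.strip name)).toList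
      = PySem.Chars.lower (PySem.Chars.strip name.toList) := by
    rw [PySem.Str.toList_lower, PySem.Str.toList_strip]
  set L := PySem.Chars.lower (PySem.Chars.strip name.toList) with hL
  rw [hbridge]
  have hfold := pvFoldA_eq L [] []
  simp only [List.nil_append] at hfold
  rw [pvRunsAux_spec] at hfold
  simp only [List.isEmpty_nil, if_true] at hfold
  simp only [hfold]
  have hall := pvAltRuns_ne_nil L
  have hfilter : (pvAltRuns L).filter (fun p => !p.isEmpty) = pvAltRuns L := by
    apply List.filter_eq_self.mpr
    intro p hp
    simpa using hall p hp
  rw [hfilter]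
  by_cases hp : pvAltRuns L = []
  · simp [hp, PySem.Chars.join, List.intercalate]
  · have hjoin := pvJoin_ne_nil (pvAltRuns L) hp hall
    simp [hp, List.isEmpty_iff, hjoin]
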